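-- pv_equiv track=rewrite | github.com/adameste/anidbcli | anidbcli/operations.py | filename_friendly
-- ===== SOURCE A (Python) =====
-- def filename_friendly(input):
--     replace_with_space = ["<", ">", "/", "\\", "*", "|"]
--     for i in replace_with_space:
--         input = input.replace(i, " ")
--     input = input.replace("\"", "'")
--     input = input.replace(":","")
--     input = input.replace("?","")
--     return input
-- ===== SOURCE B (Python) =====
-- def filename_friendly(input):
--     mapping = {"<": " ", ">": " ", "/": " ", "\\": " ", "*": " ",
--                "|": " ", "\"": "'", ":": "", "?": ""}
--     return "".join(mapping.get(c, c) for c in input)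
-- ===== Notes on version B (the rewrite author's own statement) =====
-- stated objective: simpler
-- what changed: Replaces eight sequential whole-string .replace() passes with one character-level pass that maps each character through a single translation dict and joins the results.
import Mathlib
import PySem

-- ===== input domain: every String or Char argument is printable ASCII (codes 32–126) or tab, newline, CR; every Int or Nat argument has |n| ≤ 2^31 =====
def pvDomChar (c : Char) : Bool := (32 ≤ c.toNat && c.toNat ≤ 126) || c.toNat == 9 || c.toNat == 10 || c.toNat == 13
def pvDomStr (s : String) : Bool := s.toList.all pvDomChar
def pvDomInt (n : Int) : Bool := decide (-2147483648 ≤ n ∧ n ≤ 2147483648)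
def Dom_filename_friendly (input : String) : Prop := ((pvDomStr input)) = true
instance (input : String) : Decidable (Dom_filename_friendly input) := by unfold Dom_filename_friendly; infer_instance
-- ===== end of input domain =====

-- B replaces A's eight sequential whole-string .replace() passes by a single
-- character-level pass through one translation dict (objective: simpler).


-- ===== PORT A =====
-- A: loop `for i in replace_with_space: input = input.replace(i, " ")` over the
-- six characters, then three more whole-string replaces.
def filename_friendly (input : String) : String :=
  let replace_with_space : List String := ["<", ">", "/", "\\", "*", "|"]
  let input := replace_with_space.foldl (fun acc i => PySem.Str.replace acc i " ") input
  let input := PySem.Str.replace input "\"" "'"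
  let input := PySem.Str.replace input ":" ""
  let input := PySem.Str.replace input "?" ""
  input

-- ===== PORT B =====
-- B's dict literal; string values carried as List Char, ''.join of the mapped
-- pieces is the flatMap over the input's characters (exact for char-list pieces).
def ffMapping : PySem.Dict Char (List Char) :=
  PySem.Dict.ofList [('<', [' ']), ('>', [' ']), ('/', [' ']), ('\\', [' ']),
                     ('*', [' ']), ('|', [' ']), ('"', ['\'']), (':', []), ('?', [])]

def filename_friendly_alt (input : String) : String :=
  String.ofList (input.toList.flatMap (fun c => ffMapping.getD c [c]))

-- ===== PRECONDITION & SPEC =====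
def Spec_filename_friendly (input : String) (out : String) : Prop := out = filename_friendly_alt input
instance (input : String) (out : String) : Decidable (Spec_filename_friendly input out) := by unfold Spec_filename_friendly; infer_instance

-- ===== CLAIM (what is proved, stated in full; the proofs are below) =====
def Claim_equal_filename_friendly : Prop := ∀ (input : String), Dom_filename_friendly input → Spec_filename_friendly input (filename_friendly input)

-- ===== LEMMAS AND PROOFS =====

-- single-character replace is a flatMap over the characters
theorem replace_go_single (o : Char) (new : List Char) :
    ∀ (l : List Char) (fuel : Nat) (acc : List Char), l.length ≤ fuel →
      PySem.Chars.replace.go [o] new fuel l acc =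
        acc.reverse ++ l.flatMap (fun c => if c = o then new else [c]) := by
  intro l
  induction l with
  | nil =>
      intro fuel acc _
      cases fuel <;> simp [PySem.Chars.replace.go]
  | cons c t ih =>
      intro fuel acc h
      cases fuel with
      | zero => simp at h
      | succ n =>
          by_cases hc : c = o
          · subst hc
            have hstep : PySem.Chars.replace.go [c] new (n + 1) (c :: t) acc =
                PySem.Chars.replace.go [c] new n t (new.reverse ++ acc) := by
              simp [PySem.Chars.replace.go, List.isPrefixOf]
            rw [hstep, ih n (new.reverse ++ acc) (by simpa using h)]
            simp
          · have hb : ([o].isPrefixOf (c :: t)) = false := by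
              simp [List.isPrefixOf]
              exact fun h' => absurd h'.symm hc
            simp only [PySem.Chars.replace.go, hb, Bool.false_eq_true, if_false]
            rw [ih n (c :: acc) (by simpa using h)]
            simp [hc]

theorem replace_single (s : List Char) (o : Char) (new : List Char) :
    PySem.Chars.replace s [o] new = s.flatMap (fun c => if c = o then new else [c]) := by
  simpa using replace_go_single o new s s.length [] le_rfl

-- the composed A-side per-character function equals B's dict lookup
theorem step_eq (c : Char) :
    ((if c = '<' then [' '] else [c]).flatMap (fun c =>
      (if c = '>' then [' '] else [c]).flatMap (fun c =>
        (if c = '/' then [' '] else [c]).flatMap (fun c =>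
          (if c = '\\' then [' '] else [c]).flatMap (fun c =>
            (if c = '*' then [' '] else [c]).flatMap (fun c =>
              (if c = '|' then [' '] else [c]).flatMap (fun c =>
                (if c = '"' then ['\''] else [c]).flatMap (fun c =>
                  (if c = ':' then [] else [c]).flatMap (fun c =>
                    if c = '?' then [] else [c])))))))) : List Char) =
      ffMapping.getD c [c] := by
  by_cases h1 : c = '<'; · subst h1; decide
  by_cases h2 : c = '>'; · subst h2; decide
  by_cases h3 : c = '/'; · subst h3; decide
  by_cases h4 : c = '\\'; · subst h4; decide
  by_cases h5 : c = '*'; · subst h5; decide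
  by_cases h6 : c = '|'; · subst h6; decide
  by_cases h7 : c = '"'; · subst h7; decide
  by_cases h8 : c = ':'; · subst h8; decide
  by_cases h9 : c = '?'; · subst h9; decide
  simp [ffMapping, PySem.Dict.ofList, PySem.Dict.update,
    PySem.Dict.getD_insert, PySem.Dict.getD_empty, h1, h2, h3, h4, h5, h6, h7, h8, h9]

theorem eq_ofList_of_toList (s : String) (l : List Char) (h : s.toList = l) :
    s = String.ofList l := by
  subst h; exact String.ofList_toList.symm

-- ===== VERDICT (by name: the statement is the Claim_ definition above) =====

theorem filename_friendly_spec : Claim_equal_filename_friendly := by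
  intro input _
  unfold Spec_filename_friendly filename_friendly filename_friendly_alt
  simp only [List.foldl]
  apply eq_ofList_of_toList
  simp only [PySem.Str.toList_replace,
    show ("<" : String).toList = ['<'] from rfl,
    show (">" : String).toList = ['>'] from rfl,
    show ("/" : String).toList = ['/'] from rfl,
    show ("\\" : String).toList = ['\\'] from rfl,
    show ("*" : String).toList = ['*'] from rfl,
    show ("|" : String).toList = ['|'] from rfl,
    show ("\"" : String).toList = ['"'] from rfl,
    show (":" : String).toList = [':'] from rfl,
    show ("?" : String).toList = ['?'] from rfl,
    show (" " : String).toList = [' '] from rfl,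
    show ("'" : String).toList = ['\''] from rfl,
    show ("" : String).toList = [] from rfl]
  simp only [replace_single, List.flatMap_assoc]
  exact congrArg (fun f => List.flatMap f input.toList) (funext step_eq)
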